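-- pv_equiv track=rewrite | github.com/datpetr/foxford_21-22 | probes/jobs_22.04.22/test.py | f
-- ===== SOURCE A (Python) =====
-- def f(n):
--     x = str(n)
--     for i in range(len(x) - 2):
--         if not(x[i] != x[i + 1] and
--                x[i] != x[i + 2] and
--                x[i + 1] != x[i + 2]):
--             return False
--     return True
-- ===== SOURCE B (Python) =====
-- def f(n):
--     x = str(n)
--     if len(x) < 3:
--         return True
--     last = {}
--     for i, ch in enumerate(x):
--         if ch in last and i - last[ch] < 3:
--             return False
--         last[ch] = i
--     return True
-- ===== Notes on version B (the rewrite author's own statement) =====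
-- stated objective: alternative
-- what changed: B replaces A's triple-inequality test on every 3-window by a single pass that maintains a dictionary of the last index of each character and rejects when a character recurs within distance < 3 (windows all-distinct iff every repeated character's consecutive occurrences are at least 3 apart), with a short-string guard.
import Mathlib
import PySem

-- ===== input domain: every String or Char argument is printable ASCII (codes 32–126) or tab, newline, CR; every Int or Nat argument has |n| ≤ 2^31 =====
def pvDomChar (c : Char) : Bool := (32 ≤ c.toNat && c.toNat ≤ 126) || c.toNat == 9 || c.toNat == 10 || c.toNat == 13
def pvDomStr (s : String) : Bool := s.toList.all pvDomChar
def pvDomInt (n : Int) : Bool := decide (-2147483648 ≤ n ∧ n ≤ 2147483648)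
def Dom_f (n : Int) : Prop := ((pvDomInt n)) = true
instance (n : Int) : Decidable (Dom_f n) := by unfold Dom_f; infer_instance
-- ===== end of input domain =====

-- B replaces A's per-window triple-inequality test by a single pass maintaining a
-- dictionary of the last index of each character, rejecting a recurrence at distance < 3;
-- alternative algorithm (different data structure), same asymptotic cost.

-- ===== PORT A =====
def f (n : Int) : Bool :=
  let x := (PySem.Int.toStr n).toList
  (PySem.List.pyRange 0 ((x.length : Int) - 2) 1).all (fun i =>
    decide (PySem.List.pyGet? x i ≠ PySem.List.pyGet? x (i + 1)) &&
    decide (PySem.List.pyGet? x i ≠ PySem.List.pyGet? x (i + 2)) &&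
    decide (PySem.List.pyGet? x (i + 1) ≠ PySem.List.pyGet? x (i + 2)))

-- ===== PORT B =====
-- the 'for i, ch in enumerate(x)' loop: i is the running index, last the dict of last positions
def fAltScan : List Char → Int → PySem.Dict Char Int → Bool
  | [], _, _ => true
  | ch :: rest, i, last =>
    match last.get? ch with
    | some m => if i - m < 3 then false else fAltScan rest (i + 1) (last.insert ch i)
    | none => fAltScan rest (i + 1) (last.insert ch i)

def f_alt (n : Int) : Bool :=
  let x := (PySem.Int.toStr n).toList
  if (x.length : Int) < 3 then true
  else fAltScan x 0 PySem.Dict.empty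

-- ===== PRECONDITION & SPEC =====
def Spec_f (n : Int) (out : Bool) : Prop := out = f_alt n
instance (n : Int) (out : Bool) : Decidable (Spec_f n out) := by unfold Spec_f; infer_instance

-- ===== CLAIM (what is proved, stated in full; the proofs are below) =====
def Claim_equal_f : Prop := ∀ (n : Int), Dom_f n → Spec_f n (f n)

-- ===== LEMMAS AND PROOFS =====

-- index of the last occurrence of c in a list (proof-side helper)
def lastOcc : List Char → Char → Option Nat
  | [], _ => none
  | a :: rest, c =>
    match lastOcc rest c with
    | some m => some (m + 1)
    | none => if a = c then some 0 else none

theorem lastOcc_append_singleton (pre : List Char) (a c : Char) :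
    lastOcc (pre ++ [a]) c = if a = c then some pre.length else lastOcc pre c := by
  induction pre with
  | nil => by_cases h : a = c <;> simp [lastOcc, h]
  | cons b pre ih =>
      simp only [List.cons_append, lastOcc, ih]
      by_cases h : a = c <;> simp [h]

theorem lastOcc_some (pre : List Char) (c : Char) (m : Nat)
    (h : lastOcc pre c = some m) : pre[m]? = some c := by
  induction pre generalizing m with
  | nil => simp [lastOcc] at h
  | cons b pre ih =>
      unfold lastOcc at h
      cases hl : lastOcc pre c with
      | some k =>
          rw [hl] at h
          obtain rfl : k + 1 = m := by simpa using h
          simpa using ih k hl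
      | none =>
          rw [hl] at h
          by_cases hb : b = c
          · subst hb
            simp at h
            subst h
            simp
          · simp [hb] at h

theorem le_lastOcc (pre : List Char) (c : Char) (p : Nat)
    (h : pre[p]? = some c) : ∃ m, lastOcc pre c = some m ∧ p ≤ m := by
  induction pre generalizing p with
  | nil => simp at h
  | cons b pre ih =>
      cases p with
      | zero =>
          simp at h
          cases hl : lastOcc pre c with
          | some k => exact ⟨k + 1, by simp [lastOcc, hl], by omega⟩
          | none => exact ⟨0, by simp [lastOcc, hl, h], le_refl _⟩
      | succ p =>
          simp at h
          obtain ⟨m, hm, hpm⟩ := ih p h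
          exact ⟨m + 1, by simp [lastOcc, hm], by omega⟩

-- the canonical condition: no equal pair of characters at distance < 3, restricted to
-- right endpoints q ≥ k
def NoClose (x : List Char) (k : Nat) : Prop :=
  ∀ p q : Nat, p < q → q < x.length → k ≤ q → x[p]? = x[q]? → 3 ≤ q - p

theorem fAltScan_iff (suf : List Char) :
    ∀ (pre : List Char) (d : PySem.Dict Char Int),
    (∀ c, d.get? c = Option.map (fun m : Nat => (m : Int)) (lastOcc pre c)) →
    (fAltScan suf (pre.length : Int) d = true ↔ NoClose (pre ++ suf) pre.length) := by
  induction suf with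
  | nil =>
      intro pre d _
      constructor
      · intro _ p q _ hq hkq _
        simp only [List.append_nil] at hq
        omega
      · intro _
        rfl
  | cons ch rest ih =>
      intro pre d hd
      have hfull : pre ++ ch :: rest = (pre ++ [ch]) ++ rest := by simp
      have hgetL : (pre ++ ch :: rest)[pre.length]? = some ch := by
        rw [List.getElem?_append_right (le_refl _)]
        simp
      have hd' : ∀ c, (d.insert ch (pre.length : Int)).get? c =
          Option.map (fun m : Nat => (m : Int)) (lastOcc (pre ++ [ch]) c) := by
        intro c
        rw [PySem.Dict.get?_insert, lastOcc_append_singleton]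
        by_cases hc : c = ch
        · simp [hc]
        · have hc' : ¬ ch = c := fun h => hc h.symm
          simp [hc, hc', hd c]
      have hih := ih (pre ++ [ch]) (d.insert ch (pre.length : Int)) hd'
      rw [hfull] at *
      have hlen2 : (pre ++ [ch]).length = pre.length + 1 := by simp
      rw [hlen2] at hih
      have hcast : ((pre.length : Int) + 1) = (((pre.length + 1 : Nat)) : Int) := by
        push_cast; ring
      -- relate NoClose at pre.length with NoClose at pre.length + 1 plus the q = pre.length slice
      have hsplit : NoClose ((pre ++ [ch]) ++ rest) pre.length ↔
          ((∀ p : Nat, p < pre.length → ((pre ++ [ch]) ++ rest)[p]? = some ch → 3 ≤ pre.length - p)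
            ∧ NoClose ((pre ++ [ch]) ++ rest) (pre.length + 1)) := by
        constructor
        · intro h
          refine ⟨fun p hp hpc => h p pre.length hp (by simp) (le_refl _) (by rw [hpc, hgetL]), ?_⟩
          intro p q hpq hq hkq hx
          exact h p q hpq hq (by omega) hx
        · rintro ⟨h0, h1⟩ p q hpq hq hkq hx
          by_cases hqL : q = pre.length
          · subst hqL
            have : ((pre ++ [ch]) ++ rest)[p]? = some ch := by
              rw [hx, hgetL]
            exact h0 p hpq this
          · exact h1 p q hpq hq (by omega) hx
      -- the guard condition, characterized through lastOcc
      show (fAltScan (ch :: rest) (pre.length : Int) d = true ↔ _)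
      unfold fAltScan
      rw [hd ch]
      cases hl : lastOcc pre ch with
      | none =>
          simp only [Option.map_none]
          rw [hcast, hih, hsplit]
          constructor
          · intro h
            refine ⟨fun p hp hpc => ?_, h⟩
            exfalso
            have hpre : pre[p]? = some ch := by
              have hstep : ((pre ++ [ch]) ++ rest)[p]? = pre[p]? := by
                rw [List.getElem?_append_left (by simp; omega),
                    List.getElem?_append_left (by omega)]
              exact hstep.symm.trans hpc
            obtain ⟨m, hm, _⟩ := le_lastOcc pre ch p hpre
            rw [hl] at hm
            simp at hm
          · exact fun h => h.2
      | some m =>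
          have hmocc : pre[m]? = some ch := lastOcc_some pre ch m hl
          have hmlt : m < pre.length := by
            by_contra hc
            rw [List.getElem?_eq_none (by omega)] at hmocc
            simp at hmocc
          simp only [Option.map_some]
          by_cases hclose : (pre.length : Int) - (m : Int) < 3
          · rw [if_pos hclose]
            simp only [Bool.false_eq_true, false_iff]
            intro h
            have hocc : ((pre ++ [ch]) ++ rest)[m]? = some ch := by
              rw [List.getElem?_append_left (by simp; omega),
                  List.getElem?_append_left (by omega)]
              exact hmocc
            have := h m pre.length hmlt (by simp) (le_refl _)
              (by rw [hocc, hgetL])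
            omega
          · rw [if_neg hclose, hcast, hih, hsplit]
            constructor
            · intro h
              refine ⟨fun p hp hpc => ?_, h⟩
              have hpre : pre[p]? = some ch := by
                have hstep : ((pre ++ [ch]) ++ rest)[p]? = pre[p]? := by
                  rw [List.getElem?_append_left (by simp; omega),
                      List.getElem?_append_left (by omega)]
                exact hstep.symm.trans hpc
              obtain ⟨m', hm', hpm⟩ := le_lastOcc pre ch p hpre
              rw [hl] at hm'
              obtain rfl : m = m' := by simpa using hm'
              omega
            · exact fun h => h.2

-- A's windowed all-loop, characterized by the same canonical condition (when length ≥ 3)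
theorem f_windows_iff (x : List Char) (h3 : ¬ ((x.length : Int) < 3)) :
    ((PySem.List.pyRange 0 ((x.length : Int) - 2) 1).all (fun i =>
      decide (PySem.List.pyGet? x i ≠ PySem.List.pyGet? x (i + 1)) &&
      decide (PySem.List.pyGet? x i ≠ PySem.List.pyGet? x (i + 2)) &&
      decide (PySem.List.pyGet? x (i + 1) ≠ PySem.List.pyGet? x (i + 2))) = true)
    ↔ NoClose x 0 := by
  have hget : ∀ p : Nat, p < x.length → PySem.List.pyGet? x (p : Int) = x[p]? := by
    intro p _
    simp [pysem]
  simp only [List.all_eq_true, PySem.List.mem_pyRange_one, Bool.and_eq_true, decide_eq_true_eq]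
  constructor
  · intro hA p q hpq hq _ hx
    by_contra hlt
    -- q - p is 1 or 2
    have hq2 : q = p + 1 ∨ q = p + 2 := by omega
    rcases hq2 with rfl | rfl
    · by_cases hp : (p : Int) < (x.length : Int) - 2
      · have := (hA (p : Int) ⟨by omega, hp⟩).1.1
        apply this
        rw [hget p (by omega)]
        have : (p : Int) + 1 = ((p + 1 : Nat) : Int) := by push_cast; ring
        rw [this, hget (p + 1) (by omega), hx]
      · -- p = x.length - 2; use the window at p - 1
        have hp1 : (1 : Nat) ≤ p := by omega
        have := (hA ((p - 1 : Nat) : Int) ⟨by omega, by omega⟩).2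
        apply this
        have e1 : ((p - 1 : Nat) : Int) + 1 = ((p : Nat) : Int) := by omega
        have e2 : ((p - 1 : Nat) : Int) + 2 = ((p + 1 : Nat) : Int) := by push_cast; omega
        rw [e1, e2, hget p (by omega), hget (p + 1) (by omega), hx]
    · have := (hA (p : Int) ⟨by omega, by omega⟩).1.2
      apply this
      have e2 : (p : Int) + 2 = ((p + 2 : Nat) : Int) := by push_cast; ring
      rw [hget p (by omega), e2, hget (p + 2) (by omega), hx]
  · intro hP i ⟨hi0, hi2⟩
    set p : Nat := i.toNat with hp
    have hpi : (p : Int) = i := by omega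
    have e1 : i + 1 = ((p + 1 : Nat) : Int) := by push_cast; omega
    have e2 : i + 2 = ((p + 2 : Nat) : Int) := by push_cast; omega
    rw [e1, e2, ← hpi, hget p (by omega), hget (p + 1) (by omega), hget (p + 2) (by omega)]
    refine ⟨⟨fun h => ?_, fun h => ?_⟩, fun h => ?_⟩
    · have := hP p (p + 1) (by omega) (by omega) (by omega) h; omega
    · have := hP p (p + 2) (by omega) (by omega) (by omega) h; omega
    · have := hP (p + 1) (p + 2) (by omega) (by omega) (by omega) h; omega

theorem f_core (x : List Char) :
    ((PySem.List.pyRange 0 ((x.length : Int) - 2) 1).all (fun i =>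
      decide (PySem.List.pyGet? x i ≠ PySem.List.pyGet? x (i + 1)) &&
      decide (PySem.List.pyGet? x i ≠ PySem.List.pyGet? x (i + 2)) &&
      decide (PySem.List.pyGet? x (i + 1) ≠ PySem.List.pyGet? x (i + 2))))
    = (if (x.length : Int) < 3 then true else fAltScan x 0 PySem.Dict.empty) := by
  by_cases h3 : (x.length : Int) < 3
  · rw [if_pos h3, PySem.List.pyRange_one_eq_nil (by omega)]
    rfl
  · rw [if_neg h3]
    have hscan := fAltScan_iff x [] PySem.Dict.empty
      (by intro c; simp [lastOcc, PySem.Dict.get?_empty])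
    simp only [List.length_nil, Nat.cast_zero, List.nil_append] at hscan
    rw [Bool.eq_iff_iff, f_windows_iff x h3, hscan]

-- ===== VERDICT (by name: the statement is the Claim_ definition above) =====
theorem f_spec : Claim_equal_f := by
  intro n _
  unfold Spec_f f f_alt
  exact f_core _
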